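-- pv_equiv track=rewrite | github.com/hyeeun1031/coding-practice | 프로그래머스/2/17677. ［1차］ 뉴스 클러스터링/［1차］ 뉴스 클러스터링.py | make_multiset
-- ===== SOURCE A (Python) =====
-- from collections import Counter
--
-- def make_multiset(s: str) -> Counter:
--     s = s.lower()
--     pairs = []
--     for i in range(len(s) - 1):
--         p = s[i:i+2]
--         # 두 글자 모두 알파벳인지 확인
--         if p[0].isalpha() and p[1].isalpha():
--             pairs.append(p)
--     return Counter(pairs)
-- ===== SOURCE B (Python) =====
-- from collections import Counter
--
-- def make_multiset(s: str) -> Counter: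
--     # Two-level pass: collect maximal runs of alphabetic chars, then emit each
--     # run's adjacent 2-grams and count them.
--     s = s.lower()
--     runs = []
--     run = ''
--     for c in s:
--         if c.isalpha():
--             run += c
--         else:
--             if len(run) > 1:
--                 runs.append(run)
--             run = ''
--     if len(run) > 1:
--         runs.append(run)
--     cnt = Counter()
--     for run in runs:
--         for a, b in zip(run, run[1:]):
--             cnt[a + b] += 1
--     return cnt
-- ===== Notes on version B (the rewrite author's own statement) =====
-- stated objective: alternative
-- what changed: Replaces the flat per-index window loop with a guard inside by a two-level pass: first group the lowered string into maximal runs of alphabetic characters, then emit each run's adjacent bigrams via zip and count them.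
import Mathlib
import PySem

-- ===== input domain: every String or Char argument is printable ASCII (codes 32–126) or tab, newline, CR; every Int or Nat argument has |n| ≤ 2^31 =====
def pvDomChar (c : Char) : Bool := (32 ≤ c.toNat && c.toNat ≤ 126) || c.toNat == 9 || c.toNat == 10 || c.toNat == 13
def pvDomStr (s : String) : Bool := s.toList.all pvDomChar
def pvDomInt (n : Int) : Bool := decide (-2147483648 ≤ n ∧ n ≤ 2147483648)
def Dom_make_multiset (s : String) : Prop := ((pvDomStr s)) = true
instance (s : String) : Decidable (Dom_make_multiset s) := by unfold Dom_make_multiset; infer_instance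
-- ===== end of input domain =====

-- B groups the lowered string into maximal alphabetic runs and counts each run's adjacent
-- bigrams, instead of A's flat indexed window loop; same cost, different decomposition.

-- ===== PORT A =====
def make_multiset (s : String) : List (String × Int) :=
  let t := PySem.Str.lower s
  let pairs := (PySem.List.pyRange 0 (PySem.Str.len t - 1) 1).foldl
    (fun acc i =>
      let p := PySem.Str.slice t (some i) (some (i + 2))
      if ((PySem.Str.pyGet? p 0).any PySem.Chars.isalpha
          && (PySem.Str.pyGet? p 1).any PySem.Chars.isalpha)
      then acc ++ [p] else acc)
    []
  (PySem.Dict.counter pairs).items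

-- ===== PORT B =====
-- one step of B's run-collecting loop (state = (runs so far, current run))
def pvStep (st : List (List Char) × List Char) (c : Char) : List (List Char) × List Char :=
  if PySem.Chars.isalpha c then (st.1, st.2 ++ [c])
  else (if st.2.length > 1 then st.1 ++ [st.2] else st.1, [])

def make_multiset_alt (s : String) : List (String × Int) :=
  let l := (PySem.Str.lower s).toList
  let st := l.foldl pvStep ([], [])
  let runs := if st.2.length > 1 then st.1 ++ [st.2] else st.1
  let cnt := runs.foldl
    (fun d r => (r.zip r.tail).foldl
      (fun d ab => d.modify (String.ofList [ab.1, ab.2]) 0 (· + 1)) d)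
    PySem.Dict.empty
  cnt.items

-- ===== PRECONDITION & SPEC =====
def Spec_make_multiset (s : String) (out : List (String × Int)) : Prop := out = make_multiset_alt s
instance (s : String) (out : List (String × Int)) : Decidable (Spec_make_multiset s out) := by unfold Spec_make_multiset; infer_instance

-- ===== CLAIM (what is proved, stated in full; the proofs are below) =====
def Claim_equal_make_multiset : Prop := ∀ (s : String), Dom_make_multiset s → Spec_make_multiset s (make_multiset s)

-- ===== LEMMAS AND PROOFS =====

theorem range_cons (n : Nat) : List.range (n+1) = 0 :: (List.range n).map (·+1) := by
  rw [List.range_eq_range', List.range'_succ, List.range_eq_range']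
  congr 1
  rw [List.range'_eq_map_range]
  simp [Nat.add_comm, ← List.range_eq_range']

-- the adjacent both-alpha windows of a char list, in order (characterises A's pairs list)
def wp : List Char → List String
  | a :: b :: rest =>
      (if (PySem.Chars.isalpha a && PySem.Chars.isalpha b) then [String.ofList [a, b]] else [])
        ++ wp (b :: rest)
  | _ => []

-- the bigrams of one run (B's zip)
def big (r : List Char) : List String :=
  (r.zip r.tail).map (fun ab => String.ofList [ab.1, ab.2])

-- A's window contribution at index k, on the list side
def winG (l : List Char) (k : Nat) : List String :=
  let p := (l.drop k).take 2
  if ((PySem.List.pyGet? p 0).any PySem.Chars.isalpha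
      && (PySem.List.pyGet? p 1).any PySem.Chars.isalpha)
  then [String.ofList p] else []

theorem winG_succ (a : Char) (l : List Char) (k : Nat) : winG (a :: l) (k + 1) = winG l k := by
  simp [winG]

theorem range_flatMap_winG (l : List Char) :
    (List.range (l.length - 1)).flatMap (winG l) = wp l := by
  induction l with
  | nil => simp [wp]
  | cons a l ih =>
    cases l with
    | nil => simp [wp]
    | cons b rest =>
      have hlen : (a :: b :: rest).length - 1 = ((b :: rest).length - 1) + 1 := by simp
      rw [hlen, range_cons]
      simp only [List.flatMap_cons, List.flatMap_map]
      have h0 : winG (a :: b :: rest) 0 =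
          (if (PySem.Chars.isalpha a && PySem.Chars.isalpha b) then [String.ofList [a, b]] else []) := by
        simp [winG, PySem.List.pyGet?, PySem.List.pyIdx?]
      have hsh : (fun k => winG (a :: b :: rest) (k + 1)) = winG (b :: rest) := by
        funext k; exact winG_succ a (b :: rest) k
      simp only [hsh]
      rw [ih]
      simp [wp, h0]

theorem big_short (r : List Char) (h : ¬ r.length > 1) : big r = [] := by
  match r, h with
  | [], _ => rfl
  | [a], _ => rfl
  | a :: b :: t, h => simp at h

theorem wp_all_alpha_append (cur t : List Char)
    (hal : ∀ c ∈ cur, PySem.Chars.isalpha c = true)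
    (ht : t = [] ∨ ∃ c t', t = c :: t' ∧ PySem.Chars.isalpha c = false) :
    wp (cur ++ t) = big cur ++ wp t := by
  induction cur with
  | nil => simp [big]
  | cons a cs ih =>
    cases cs with
    | nil =>
      rcases ht with rfl | ⟨c, t', rfl, hc⟩
      · simp [wp, big]
      · simp [wp, big, hc]
    | cons b cs' =>
      have ha : PySem.Chars.isalpha a = true := hal a (by simp)
      have hb : PySem.Chars.isalpha b = true := hal b (by simp)
      have ih' := ih (fun c hc => hal c (List.mem_cons_of_mem a hc))
      simp only [List.cons_append] at ih' ⊢
      rw [show wp (a :: b :: (cs' ++ t)) =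
          (if (PySem.Chars.isalpha a && PySem.Chars.isalpha b) then [String.ofList [a, b]] else [])
            ++ wp (b :: (cs' ++ t)) from rfl, ih']
      simp [big, ha, hb]

theorem wp_nonalpha_cons (c : Char) (l : List Char) (hc : PySem.Chars.isalpha c = false) :
    wp (c :: l) = wp l := by
  cases l with
  | nil => rfl
  | cons d l' => simp [wp, hc]

-- B's final run list, as a function of remaining input and loop state
def finishF (l : List Char) (st : List (List Char) × List Char) : List (List Char) :=
  let st' := l.foldl pvStep st
  if st'.2.length > 1 then st'.1 ++ [st'.2] else st'.1

theorem finishF_invariant (l : List Char) :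
    ∀ (rs : List (List Char)) (cur : List Char),
      (∀ c ∈ cur, PySem.Chars.isalpha c = true) →
      (finishF l (rs, cur)).flatMap big = rs.flatMap big ++ wp (cur ++ l) := by
  induction l with
  | nil =>
    intro rs cur hal
    simp only [finishF, List.foldl_nil, List.append_nil]
    have h1 : wp cur = big cur := by
      simpa [wp] using wp_all_alpha_append cur [] hal (Or.inl rfl)
    by_cases h : cur.length > 1
    · simp [h, h1]
    · simp [h, big_short cur h, h1]
  | cons c l ih =>
    intro rs cur hal
    by_cases hc : PySem.Chars.isalpha c = true
    · have hF : finishF (c :: l) (rs, cur) = finishF l (rs, cur ++ [c]) := by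
        simp [finishF, pvStep, hc]
      have hal' : ∀ d ∈ cur ++ [c], PySem.Chars.isalpha d = true := by
        intro d hd
        rcases List.mem_append.1 hd with h | h
        · exact hal d h
        · simp at h; subst h; exact hc
      rw [hF, ih rs (cur ++ [c]) hal']
      simp
    · have hc' : PySem.Chars.isalpha c = false := by simpa using hc
      have hF : finishF (c :: l) (rs, cur) =
          finishF l ((if cur.length > 1 then rs ++ [cur] else rs), []) := by
        simp [finishF, pvStep, hc']
      rw [hF, ih _ [] (by intro d hd; simp at hd)]
      rw [wp_all_alpha_append cur (c :: l) hal (Or.inr ⟨c, l, rfl, hc'⟩),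
          wp_nonalpha_cons c l hc']
      by_cases h : cur.length > 1
      · simp [h]
      · simp [h, big_short cur h]

-- A's pairs list equals wp of the lowered char list
theorem pairsA_eq_wp (t : String) :
    ((PySem.List.pyRange 0 (PySem.Str.len t - 1) 1).foldl
      (fun acc i =>
        let p := PySem.Str.slice t (some i) (some (i + 2))
        if ((PySem.Str.pyGet? p 0).any PySem.Chars.isalpha
            && (PySem.Str.pyGet? p 1).any PySem.Chars.isalpha)
        then acc ++ [p] else acc)
      []) = wp t.toList := by
  have hb : (fun (acc : List String) (i : Int) =>
        let p := PySem.Str.slice t (some i) (some (i + 2))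
        if ((PySem.Str.pyGet? p 0).any PySem.Chars.isalpha
            && (PySem.Str.pyGet? p 1).any PySem.Chars.isalpha)
        then acc ++ [p] else acc)
      = (fun acc i => acc ++
          (let p := PySem.Str.slice t (some i) (some (i + 2))
           if ((PySem.Str.pyGet? p 0).any PySem.Chars.isalpha
               && (PySem.Str.pyGet? p 1).any PySem.Chars.isalpha)
           then [p] else [])) := by
    funext acc i
    dsimp only
    split
    · rfl
    · simp
  rw [hb, PySem.List.foldl_append_eq_flatMap, List.nil_append, PySem.List.pyRange_one,
      List.flatMap_map]
  have hn : ((PySem.Str.len t - 1 - 0)).toNat = t.toList.length - 1 := by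
    have : PySem.Str.len t = (t.toList.length : Int) := by simp
    omega
  rw [hn, ← range_flatMap_winG t.toList]
  have hfun : (fun (k : Nat) =>
      (let p := PySem.Str.slice t (some (0 + (k : Int))) (some (0 + (k : Int) + 2))
       if ((PySem.Str.pyGet? p 0).any PySem.Chars.isalpha
           && (PySem.Str.pyGet? p 1).any PySem.Chars.isalpha)
       then [p] else [])) = winG t.toList := by
    funext k
    have hsl' : (PySem.Str.slice t (some (0 + (k : Int))) (some (0 + (k : Int) + 2))).toList
        = (t.toList.drop k).take 2 := by
      rw [PySem.Str.toList_slice, PySem.Chars.slice_eq_listSlice,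
          PySem.List.slice_toNat _ (by positivity) (by positivity)]
      have h1 : (0 + (k : Int) + 2).toNat = k + 2 := by omega
      have h2 : (0 + (k : Int)).toNat = k := by omega
      rw [h1, h2]
      simp
    have hsl : PySem.Str.slice t (some (0 + (k : Int))) (some (0 + (k : Int) + 2))
        = String.ofList ((t.toList.drop k).take 2) := by
      rw [← hsl', String.ofList_toList]
    simp only [winG, hsl]
    have hg0 : PySem.Str.pyGet? (String.ofList ((t.toList.drop k).take 2)) 0
        = PySem.List.pyGet? ((t.toList.drop k).take 2) 0 := by simp
    have hg1 : PySem.Str.pyGet? (String.ofList ((t.toList.drop k).take 2)) 1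
        = PySem.List.pyGet? ((t.toList.drop k).take 2) 1 := by simp
    rw [hg0, hg1]
  rw [hfun]

-- B's nested counting fold equals a flat counting fold over the flattened bigrams
theorem cntB_aux (runs : List (List Char)) : ∀ (d : PySem.Dict String Int),
    runs.foldl
      (fun d r => (r.zip r.tail).foldl
        (fun d ab => d.modify (String.ofList [ab.1, ab.2]) 0 (· + 1)) d) d
    = (runs.flatMap big).foldl (fun d x => d.modify x 0 (· + 1)) d := by
  induction runs with
  | nil => intro d; rfl
  | cons r rs ih =>
    intro d
    simp only [List.foldl_cons, List.flatMap_cons, List.foldl_append]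
    rw [ih]
    congr 1
    rw [big, List.foldl_map]

-- B's counter equals the counter of the flattened bigrams
theorem cntB_eq_counter (runs : List (List Char)) :
    runs.foldl
      (fun d r => (r.zip r.tail).foldl
        (fun d ab => d.modify (String.ofList [ab.1, ab.2]) 0 (· + 1)) d)
      PySem.Dict.empty
    = PySem.Dict.counter (runs.flatMap big) := by
  rw [PySem.Dict.counter_eq_foldl]
  exact cntB_aux runs PySem.Dict.empty

-- ===== VERDICT (by name: the statement is the Claim_ definition above) =====
theorem make_multiset_spec : Claim_equal_make_multiset := by
  intro s _
  unfold Spec_make_multiset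
  simp only [make_multiset, make_multiset_alt]
  rw [pairsA_eq_wp, cntB_eq_counter]
  have hruns := finishF_invariant (PySem.Str.lower s).toList [] []
    (by intro d hd; simp at hd)
  simp only [finishF, List.flatMap_nil, List.nil_append] at hruns
  rw [hruns]
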